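-- pv_equiv track=rewrite | github.com/DeliangZhong/MasterField | master_field/lattice.py | plaquette_insertions
-- ===== SOURCE A (Python) =====
-- def reduce_backtracks(word: tuple[int, ...]) -> tuple[int, ...]:
--     """Iteratively remove adjacent (μ, -μ) pairs.
--
--     Also handles the cyclic wrap: if the first and last elements cancel,
--     they are removed.
--     """
--     w = list(word)
--     changed = True
--     while changed and w:
--         changed = False
--         # Linear sweep
--         i = 0
--         while i < len(w) - 1:
--             if w[i] == -w[i + 1]:
--                 del w[i : i + 2]
--                 changed = True
--                 # step back one in case a new backtrack formed
--                 if i > 0: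
--                     i -= 1
--             else:
--                 i += 1
--         # Cyclic wrap-around cancellation
--         if len(w) >= 2 and w[0] == -w[-1]:
--             w = w[1:-1]
--             changed = True
--     return tuple(w)
--
-- def cyclic_canonical(word: tuple[int, ...]) -> tuple[int, ...]:
--     """Lexicographically smallest cyclic rotation."""
--     if not word:
--         return word
--     n = len(word)
--     rotations = [word[i:] + word[:i] for i in range(n)]
--     return min(rotations)
--
-- def plaquette_insertions(word: tuple[int, ...], e_idx: int, D: int) -> list[tuple[int, ...]]:
--     """Replace edge e_j = ±μ at position e_idx with a 3-edge "staple" around a plaquette.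
--
--     STAPLE CONVENTION (Kazakov-Zheng 2203.11360, Anderson-Kruczenski 2017):
--
--     For edge e_j = +μ at position e_idx, and a plaquette P in the (μ, ν) plane:
--       replace (+μ) → (+ν, +μ, -ν) for ν ∈ {+ν₀} (ν₀ running over perpendicular dirs)
--       replace (+μ) → (-ν, +μ, +ν) for the opposite orientation of the plaquette
--
--     Both staples have NET DISPLACEMENT +μ (same as the replaced edge), so the
--     new loop is still closed. They differ by which side of edge e_j the plaquette
--     is attached.
--
--     For edge e_j = -μ, the staples are:
--       replace (-μ) → (+ν, -μ, -ν) and (-ν, -μ, +ν)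
--
--     Returns the 2(D-1) resulting loops (in canonical form, after backtrack reduction).
--     Each is the loop with edge e_j detoured around one plaquette containing it.
--     """
--     if e_idx < 0 or e_idx >= len(word):
--         raise IndexError(f"e_idx {e_idx} out of range for word of length {len(word)}")
--     mu = word[e_idx]  # signed step; |mu| is direction, sign(mu) is orientation
--     inserted: list[tuple[int, ...]] = []
--     for nu_dir in range(1, D + 1):
--         if nu_dir == abs(mu):
--             continue
--         for nu_sign in (1, -1):
--             nu = nu_sign * nu_dir
--             # Staple: replace (mu) with (nu, mu, -nu)
--             # Net displacement: nu + mu + (-nu) = mu ✓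
--             staple = (nu, mu, -nu)
--             new_word = word[:e_idx] + staple + word[e_idx + 1 :]
--             reduced = reduce_backtracks(new_word)
--             if reduced:
--                 inserted.append(cyclic_canonical(reduced))
--             else:
--                 inserted.append(())  # empty loop has W=1
--     return inserted
-- ===== SOURCE B (Python) =====
-- def plaquette_insertions(word, e_idx, D):
--     """Staple insertions: single-pass stack reduction + end trimming + min rotation via doubled word."""
--     if e_idx < 0 or e_idx >= len(word):
--         raise IndexError(f"e_idx {e_idx} out of range for word of length {len(word)}")
--     mu = word[e_idx]
--     pre = word[:e_idx]
--     post = word[e_idx + 1:]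
--     out = []
--     for nu_dir in range(1, D + 1):
--         if nu_dir == abs(mu):
--             continue
--         for nu in (nu_dir, -nu_dir):
--             nw = pre + (nu, mu, -nu) + post
--             # one-pass stack-based backtrack reduction
--             st = []
--             for x in nw:
--                 if st and st[-1] == -x:
--                     st.pop()
--                 else:
--                     st.append(x)
--             # cyclic wrap: trim cancelling ends with two pointers
--             lo, hi = 0, len(st)
--             while hi - lo >= 2 and st[lo] == -st[hi - 1]:
--                 lo += 1
--                 hi -= 1
--             r = st[lo:hi]
--             if r:
--                 d = r + r
--                 n = len(r)
--                 out.append(tuple(min(d[i:i + n] for i in range(n))))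
--             else:
--                 out.append(())
--     return out
-- ===== Notes on version B (the rewrite author's own statement) =====
-- stated objective: alternative
-- what changed: A reduces backtracks by repeated index-juggling delete-sweeps over the word until a fixpoint and canonicalises by materialising every rotation; B does one stack-based pass for the reduction, trims the cyclic wrap with two pointers, and takes the minimal rotation as the least length-n window of the doubled word.
import Mathlib
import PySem

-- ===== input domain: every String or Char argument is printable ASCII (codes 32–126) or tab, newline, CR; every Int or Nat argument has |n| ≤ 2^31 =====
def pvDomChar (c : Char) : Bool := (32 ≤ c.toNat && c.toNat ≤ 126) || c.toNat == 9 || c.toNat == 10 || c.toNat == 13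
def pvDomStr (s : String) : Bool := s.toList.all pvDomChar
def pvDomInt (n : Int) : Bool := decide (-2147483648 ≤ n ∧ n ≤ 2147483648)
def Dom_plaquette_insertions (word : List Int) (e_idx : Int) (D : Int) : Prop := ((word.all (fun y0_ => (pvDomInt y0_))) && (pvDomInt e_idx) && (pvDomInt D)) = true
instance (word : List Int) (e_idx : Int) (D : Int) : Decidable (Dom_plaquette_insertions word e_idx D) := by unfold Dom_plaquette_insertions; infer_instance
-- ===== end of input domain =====

-- B replaces A's repeated O(n²) sweep-until-fixpoint backtrack reduction by a single-pass
-- stack reduction plus a two-pointer trim of the cyclic wrap, and builds the rotations for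
-- canonicalisation as windows of the doubled word (objective: alternative algorithm).

-- ===== PORT A =====

-- inner `while i < len(w) - 1` sweep of reduce_backtracks (del w[i:i+2] with a step back);
-- fuel = w.length - i bounds the iteration count, the loop itself exits on i + 1 >= len(w)
def pvSweepF : Nat → List Int → Nat → Bool → List Int × Bool
  | 0, w, _, c => (w, c)
  | fuel + 1, w, i, c =>
    if i + 1 < w.length then
      if w.getD i 0 = -(w.getD (i + 1) 0) then
        pvSweepF fuel (w.take i ++ w.drop (i + 2)) (if 0 < i then i - 1 else i) true
      else pvSweepF fuel w (i + 1) c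
    else (w, c)

-- outer `while changed and w` loop of reduce_backtracks (sweep, then cyclic wrap check);
-- fuel = 2*len(w)+1 bounds the iteration count
def pvReduceLoopF : Nat → List Int → Bool → List Int
  | 0, w, _ => w
  | fuel + 1, w, changed =>
    if changed ∧ w ≠ [] then
      let r := pvSweepF w.length w 0 false
      if 2 ≤ r.1.length ∧ PySem.List.pyGetD r.1 0 0 = -(PySem.List.pyGetD r.1 (-1) 0) then
        pvReduceLoopF fuel (PySem.List.slice r.1 (some 1) (some (-1))) true
      else
        pvReduceLoopF fuel r.1 r.2
    else w

def reduce_backtracks (word : List Int) : List Int :=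
  pvReduceLoopF (2 * word.length + 1) word true

def cyclic_canonical (word : List Int) : List Int :=
  if word = [] then word
  else
    let n := word.length
    let rotations := (List.range n).map
      (fun (i : Nat) => PySem.List.slice word (some (i : Int)) none ++ PySem.List.slice word none (some (i : Int)))
    (PySem.List.min? rotations (fun x => x)).getD []

def plaquette_insertions (word : List Int) (e_idx : Int) (D : Int) : List (List Int) :=
  let mu := PySem.List.pyGetD word e_idx 0
  (PySem.List.pyRange 1 (D + 1) 1).foldl
    (fun acc nu_dir =>
      if nu_dir = |mu| then acc
      else
        [(1 : Int), -1].foldl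
          (fun acc2 nu_sign =>
            let nu := nu_sign * nu_dir
            let new_word := PySem.List.slice word none (some e_idx) ++ [nu, mu, -nu] ++
              PySem.List.slice word (some (e_idx + 1)) none
            let reduced := reduce_backtracks new_word
            acc2 ++ [if reduced ≠ [] then cyclic_canonical reduced else []])
          acc)
    []

-- ===== PORT B =====

-- one step of the stack reduction (`if st and st[-1] == -x: st.pop() else st.append(x)`)
def pvStep (st : List Int) (x : Int) : List Int :=
  if st.getLast? = some (-x) then st.dropLast else st ++ [x]

-- two-pointer trim of cancelling ends (`while hi - lo >= 2 and st[lo] == -st[hi-1]`);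
-- fuel = hi - lo bounds the iteration count
def pvTrimF : Nat → List Int → Nat → Nat → Nat × Nat
  | 0, _, lo, hi => (lo, hi)
  | fuel + 1, st, lo, hi =>
    if lo + 2 ≤ hi ∧ st.getD lo 0 = -(st.getD (hi - 1) 0) then pvTrimF fuel st (lo + 1) (hi - 1)
    else (lo, hi)

-- least rotation as the minimum window of the doubled word (`min(d[i:i+n] for i in range(n))`)
def pvCanon (r : List Int) : List Int :=
  let d := r ++ r
  let n := r.length
  (PySem.List.min? ((List.range n).map
      (fun (i : Nat) => PySem.List.slice d (some (i : Int)) (some ((i : Int) + (n : Int))))) (fun x => x)).getD []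

def pvProcess (nw : List Int) : List Int :=
  let st := nw.foldl pvStep []
  let p := pvTrimF st.length st 0 st.length
  let r := PySem.List.slice st (some (p.1 : Int)) (some (p.2 : Int))
  if r ≠ [] then pvCanon r else []

def plaquette_insertions_alt (word : List Int) (e_idx : Int) (D : Int) : List (List Int) :=
  let mu := PySem.List.pyGetD word e_idx 0
  let pre := PySem.List.slice word none (some e_idx)
  let post := PySem.List.slice word (some (e_idx + 1)) none
  (PySem.List.pyRange 1 (D + 1) 1).foldl
    (fun acc nu_dir =>
      if nu_dir = |mu| then acc
      else
        [nu_dir, -nu_dir].foldl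
          (fun acc2 nu => acc2 ++ [pvProcess (pre ++ [nu, mu, -nu] ++ post)])
          acc)
    []

-- ===== PRECONDITION & SPEC =====
-- A raises IndexError unless 0 ≤ e_idx < len(word); exactly those inputs are admitted.
def Pre_plaquette_insertions (word : List Int) (e_idx : Int) (D : Int) : Prop :=
  0 ≤ e_idx ∧ e_idx < (word.length : Int)
instance (word : List Int) (e_idx : Int) (D : Int) : Decidable (Pre_plaquette_insertions word e_idx D) := by
  unfold Pre_plaquette_insertions; infer_instance

def pvWitness_plaquette_insertions : List Int × Int × Int := ([1, 2, -1], 0, 2)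

def Spec_plaquette_insertions (word : List Int) (e_idx : Int) (D : Int) (out : List (List Int)) : Prop := out = plaquette_insertions_alt word e_idx D
instance (word : List Int) (e_idx : Int) (D : Int) (out : List (List Int)) : Decidable (Spec_plaquette_insertions word e_idx D out) := by unfold Spec_plaquette_insertions; infer_instance

-- ===== CLAIM (what is proved, stated in full; the proofs are below) =====
def Claim_equal_plaquette_insertions : Prop := ∀ (word : List Int) (e_idx : Int) (D : Int), Dom_plaquette_insertions word e_idx D → Pre_plaquette_insertions word e_idx D → Spec_plaquette_insertions word e_idx D (plaquette_insertions word e_idx D)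

-- ===== LEMMAS AND PROOFS =====

-- Proof-side well-founded twins of the fuel loops above, plus the bridges between them.
def pvSweep (w : List Int) (i : Nat) (changed : Bool) : List Int × Bool :=
  if h : i + 1 < w.length then
    if w.getD i 0 = -(w.getD (i + 1) 0) then
      pvSweep (w.take i ++ w.drop (i + 2)) (if 0 < i then i - 1 else i) true
    else
      pvSweep w (i + 1) changed
  else
    (w, changed)
termination_by w.length - i
decreasing_by
  · have : (w.take i ++ w.drop (i + 2)).length = w.length - 2 := by
      simp [List.length_append]; omega
    simp only [this]; split <;> omega
  · omega

theorem pvSweep_cases' (w : List Int) (i : Nat) (c : Bool) :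
    ((pvSweep w i c).2 = c ∧ (pvSweep w i c).1 = w) ∨
      (pvSweep w i c).1.length + 2 ≤ w.length := by
  induction w, i, c using pvSweep.induct with
  | case1 w i c h hc ih =>
    rw [pvSweep, dif_pos h, if_pos hc]
    simp only [dite_eq_ite] at ih
    have hw' : (List.take i w ++ List.drop (i + 2) w).length = w.length - 2 := by
      simp only [List.length_append, List.length_take, List.length_drop]; omega
    right
    rcases ih with ⟨_, h2⟩ | h2
    · rw [h2]; omega
    · omega
  | case2 w i c h hc ih =>
    rw [pvSweep, dif_pos h, if_neg hc]; exact ih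
  | case3 w i c h =>
    rw [pvSweep, dif_neg h]; left; exact ⟨rfl, rfl⟩

theorem pvSweep_cases (w : List Int) (i : Nat) :
    ((pvSweep w i false).2 = false ∧ (pvSweep w i false).1 = w) ∨
      (pvSweep w i false).1.length + 2 ≤ w.length :=
  pvSweep_cases' w i false

def pvReduceLoop (w : List Int) (changed : Bool) : List Int :=
  if changed ∧ w ≠ [] then
    let r := pvSweep w 0 false
    if 2 ≤ r.1.length ∧ PySem.List.pyGetD r.1 0 0 = -(PySem.List.pyGetD r.1 (-1) 0) then
      pvReduceLoop (PySem.List.slice r.1 (some 1) (some (-1))) true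
    else
      pvReduceLoop r.1 r.2
  else
    w
termination_by 2 * w.length + (if changed then 1 else 0)
decreasing_by
  · rename_i hg hw
    have hc := pvSweep_cases w 0
    rcases hg with ⟨hg1, hg2⟩
    rcases hw with ⟨hw1, hw2⟩
    subst hg1
    have hnil : (pvSweep w 0 false).1 ≠ [] := by
      intro h
      rw [h] at hw1
      simp at hw1
    have hlen : (PySem.List.slice (pvSweep w 0 false).1 (some 1) (some (-1))).length
        = (pvSweep w 0 false).1.length - 2 := by
      rw [PySem.List.length_slice]
      simp only [PySem.List.clampIdx]
      split_ifs <;> omega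
    rw [hlen]
    rcases hc with ⟨-, hceq⟩ | hcle
    · rw [hceq] at hw1 ⊢
      simp
      omega
    · simp
      omega
  · rename_i hg hw
    rcases hg with ⟨hg1, hg2⟩
    subst hg1
    rcases pvSweep_cases w 0 with ⟨hf, hceq⟩ | hcle
    · rw [hf, hceq]
      simp
    · split <;> omega

def pvTrim (st : List Int) (lo hi : Nat) : Nat × Nat :=
  if lo + 2 ≤ hi ∧ st.getD lo 0 = -(st.getD (hi - 1) 0) then pvTrim st (lo + 1) (hi - 1)
  else (lo, hi)
termination_by hi - lo

theorem pvSweepF_eq (fuel : Nat) : ∀ (w : List Int) (i : Nat) (c : Bool),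
    w.length - i ≤ fuel → pvSweepF fuel w i c = pvSweep w i c := by
  induction fuel with
  | zero =>
    intro w i c h
    rw [pvSweepF, pvSweep, dif_neg (by omega)]
  | succ fuel ih =>
    intro w i c h
    rw [pvSweepF]
    by_cases hg : i + 1 < w.length
    · rw [if_pos hg, pvSweep, dif_pos hg]
      by_cases hc2 : w.getD i 0 = -(w.getD (i + 1) 0)
      · rw [if_pos hc2, if_pos hc2]
        have hlen : (w.take i ++ w.drop (i + 2)).length = w.length - 2 := by
          simp only [List.length_append, List.length_take, List.length_drop]; omega
        rw [ih _ _ _ (by rw [hlen]; split <;> omega)]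
      · rw [if_neg hc2, if_neg hc2, ih _ _ _ (by omega)]
    · rw [if_neg hg, pvSweep, dif_neg hg]

theorem pvReduceLoopF_eq (fuel : Nat) : ∀ (w : List Int) (c : Bool),
    2 * w.length + (if c then 1 else 0) ≤ fuel → pvReduceLoopF fuel w c = pvReduceLoop w c := by
  induction fuel with
  | zero =>
    intro w c h
    have hc : c = false := by
      cases c
      · rfl
      · simp at h
    subst hc
    rw [pvReduceLoopF, pvReduceLoop, if_neg (by simp)]
  | succ fuel ih =>
    intro w c h
    rw [pvReduceLoopF]
    by_cases hg : c = true ∧ w ≠ []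
    · rw [if_pos hg, pvReduceLoop, if_pos hg]
      rw [pvSweepF_eq w.length w 0 false (by omega)]
      rcases hg with ⟨hg1, hg2⟩
      subst hg1
      have hle : (pvSweep w 0 false).1.length ≤ w.length := by
        rcases pvSweep_cases w 0 with ⟨-, hceq⟩ | hcle
        · rw [hceq]
        · omega
      by_cases hw : 2 ≤ (pvSweep w 0 false).1.length ∧
          PySem.List.pyGetD (pvSweep w 0 false).1 0 0 =
            -(PySem.List.pyGetD (pvSweep w 0 false).1 (-1) 0)
      · rw [if_pos hw, if_pos hw]
        have hnil : (pvSweep w 0 false).1 ≠ [] := by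
          intro hx
          rw [hx] at hw
          simp at hw
        have hlen : (PySem.List.slice (pvSweep w 0 false).1 (some 1) (some (-1))).length
            = (pvSweep w 0 false).1.length - 2 := by
          rw [PySem.List.length_slice]
          simp only [PySem.List.clampIdx]
          split_ifs <;> omega
        exact ih _ _ (by rw [hlen]; simp only [if_pos rfl] at *; omega)
      · rw [if_neg hw, if_neg hw]
        rcases pvSweep_cases w 0 with ⟨hf, hceq⟩ | hcle
        · rw [hf, hceq]
          refine ih _ _ ?_
          have h1 : 2 * w.length + 1 ≤ fuel + 1 := by simpa using h
          have h2 : (if (false : Bool) = true then (1 : Nat) else 0) = 0 := by simp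
          rw [h2]
          omega
        · refine ih _ _ ?_
          have h1 : 2 * w.length + 1 ≤ fuel + 1 := by simpa using h
          split <;> omega
    · rw [if_neg hg, pvReduceLoop, if_neg hg]

theorem pvTrimF_eq (fuel : Nat) : ∀ (st : List Int) (lo hi : Nat),
    hi - lo ≤ fuel → pvTrimF fuel st lo hi = pvTrim st lo hi := by
  induction fuel with
  | zero =>
    intro st lo hi h
    rw [pvTrimF, pvTrim, if_neg (by intro hx; omega)]
  | succ fuel ih =>
    intro st lo hi h
    rw [pvTrimF]
    by_cases hg : lo + 2 ≤ hi ∧ st.getD lo 0 = -(st.getD (hi - 1) 0)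
    · rw [if_pos hg, ih _ _ _ (by omega)]
      conv_rhs => rw [pvTrim]
      rw [if_pos hg]
    · rw [if_neg hg]
      rw [pvTrim, if_neg hg]

-- `a NC b` = the pair (a, b) is not a backtrack; a word with no adjacent backtrack is IsChain NC
def NC (a b : Int) : Prop := a ≠ -b

theorem pvStep_length (st : List Int) (x : Int) : (pvStep st x).length ≤ st.length + 1 := by
  unfold pvStep; split <;> simp [List.length_dropLast] <;> omega

theorem foldl_pvStep_length (s : List Int) (p : List Int) :
    (s.foldl pvStep p).length ≤ p.length + s.length := by
  induction s generalizing p with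
  | nil => simp
  | cons x t ih =>
    have h1 := pvStep_length p x
    have h2 := ih (pvStep p x)
    simp only [List.foldl_cons, List.length_cons]
    omega

theorem foldl_pvStep_chain (s : List Int) (p : List Int) (hp : List.IsChain NC p) :
    List.IsChain NC (s.foldl pvStep p) := by
  induction s generalizing p with
  | nil => exact hp
  | cons x t ih =>
    refine ih _ ?_
    unfold pvStep
    split
    · exact hp.dropLast
    · rename_i hne
      rw [List.isChain_append]
      refine ⟨hp, by simp, ?_⟩
      intro a ha y hy
      simp only [List.head?_cons, Option.mem_def, Option.some.injEq] at hy
      subst hy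
      intro hax
      exact hne (by rw [Option.mem_def] at ha; rw [ha, hax])

theorem foldl_pvStep_fixed (s : List Int) (p : List Int) (h : List.IsChain NC (p ++ s)) :
    s.foldl pvStep p = p ++ s := by
  induction s generalizing p with
  | nil => simp
  | cons x t ih =>
    have hstep : pvStep p x = p ++ [x] := by
      unfold pvStep
      rw [if_neg]
      intro hl
      rcases List.isChain_append.mp h with ⟨-, -, hj⟩
      exact hj _ hl x (by simp) rfl
    simp only [List.foldl_cons, hstep]
    rw [ih (p ++ [x]) (by simpa using h)]
    simp

-- the sweep is exactly the stack reduction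
theorem pvSweep_eq_stack : ∀ (n : Nat) (s p : List Int) (c : Bool), s.length ≤ n →
    List.IsChain NC p →
    pvSweep (p ++ s) (p.length - 1) c =
      (s.foldl pvStep p, c || decide (s.foldl pvStep p ≠ p ++ s)) := by
  intro n
  induction n with
  | zero =>
    intro s p c hn hp
    have hs : s = [] := List.eq_nil_of_length_eq_zero (Nat.le_zero.mp hn)
    subst hs
    rw [pvSweep, dif_neg (by simp; omega)]
    simp
  | succ n ih =>
    intro s p c hn hp
    match s with
    | [] =>
      rw [pvSweep, dif_neg (by simp; omega)]
      simp
    | x :: t =>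
      rcases List.eq_nil_or_concat' p with hp0 | ⟨q, a, rfl⟩
      · subst hp0
        match t with
        | [] =>
          rw [pvSweep, dif_neg (by simp)]
          simp [pvStep]
        | y :: t' =>
          rw [pvSweep, dif_pos (by simp)]
          simp only [List.nil_append, List.length_nil, Nat.zero_sub, List.take_zero,
            List.drop_succ_cons, List.drop_zero, Nat.lt_irrefl, if_false, Nat.zero_add,
            List.getD_cons_zero, List.getD_cons_succ]
          by_cases hxy : x = -y
          · rw [if_pos hxy]
            have hstk : (x :: y :: t').foldl pvStep [] = t'.foldl pvStep [] := by
              have h1 : pvStep [] x = [x] := by simp [pvStep]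
              have h2 : pvStep [x] y = [] := by
                simp [pvStep, show (x : Int) = -y from hxy]
              simp [h1, h2]
            have hrec := ih t' [] true (by simp only [List.length_cons] at hn; omega) (by simp)
            simp only [List.nil_append, List.length_nil, Nat.zero_sub] at hrec
            rw [hrec, hstk]
            have hne : t'.foldl pvStep [] ≠ x :: y :: t' := by
              intro hcon
              have := foldl_pvStep_length t' []
              rw [hcon] at this
              simp only [List.length_cons, List.length_nil] at this
              omega
            simp [hne]
          · rw [if_neg hxy]
            have hrec := ih t' [x, y] c (by simp only [List.length_cons] at hn; omega)
              (by rw [List.isChain_pair]; exact hxy)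
            simp only [List.length_cons, List.length_nil] at hrec
            have hstk : (x :: y :: t').foldl pvStep [] = t'.foldl pvStep [x, y] := by
              have h1 : pvStep [] x = [x] := by simp [pvStep]
              have h2 : pvStep [x] y = [x, y] := by simp [pvStep, hxy]
              simp [h1, h2]
            simpa [hstk] using hrec
      · -- p = q ++ [a]
        rw [pvSweep, dif_pos (by simp only [List.length_append, List.length_cons, List.length_nil]; omega)]
        have hxa : ((q ++ [a]) ++ x :: t).getD ((q ++ [a]).length - 1) 0 = a := by
          simp [List.getD_eq_getElem?_getD, List.append_assoc]
        have hxx : ((q ++ [a]) ++ x :: t).getD ((q ++ [a]).length - 1 + 1) 0 = x := by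
          have h0 : (q ++ [a]).length - 1 + 1 = q.length + 1 := by simp
          rw [h0, List.getD_eq_getElem?_getD, List.append_assoc,
            List.getElem?_append_right (by omega)]
          simp
        rw [hxa, hxx]
        have hql : List.IsChain NC q := hp.prefix ⟨[a], rfl⟩
        by_cases hax : a = -x
        · rw [if_pos hax]
          have htake : ((q ++ [a]) ++ x :: t).take ((q ++ [a]).length - 1) = q := by
            have h0 : (q ++ [a]).length - 1 = q.length := by simp
            rw [h0, List.append_assoc, List.take_append_of_le_length (by simp)]
            simp
          have hdrop : ((q ++ [a]) ++ x :: t).drop ((q ++ [a]).length - 1 + 2) = t := by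
            have h1 : (q ++ [a]) ++ x :: t = (q ++ [a] ++ [x]) ++ t := by simp
            have h2 : (q ++ [a]).length - 1 + 2 = (q ++ [a] ++ [x]).length := by simp
            rw [h1, h2, List.drop_left]
          rw [htake, hdrop]
          have hidx : (if 0 < (q ++ [a]).length - 1 then (q ++ [a]).length - 1 - 1
              else (q ++ [a]).length - 1) = q.length - 1 := by
            simp only [List.length_append, List.length_cons, List.length_nil]
            split <;> omega
          rw [hidx]
          have hrec := ih t q true (by simp at hn; omega) hql
          rw [hrec]
          have hstk : (x :: t).foldl pvStep (q ++ [a]) = t.foldl pvStep q := by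
            have h2 : pvStep (q ++ [a]) x = q := by
              simp [pvStep, show (a : Int) = -x from hax]
            simp [h2]
          rw [hstk]
          have hne : t.foldl pvStep q ≠ (q ++ [a]) ++ x :: t := by
            intro hcon
            have := foldl_pvStep_length t q
            rw [hcon] at this
            simp only [List.length_append, List.length_cons, List.length_nil] at this
            omega
          have hne' : t.foldl pvStep q ≠ q ++ a :: x :: t := by simpa using hne
          simp [hne']
        · rw [if_neg hax]
          have hch : List.IsChain NC ((q ++ [a]) ++ [x]) := by
            rw [List.isChain_append]
            refine ⟨hp, by simp, ?_⟩
            intro u hu y hy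
            simp only [List.head?_cons, Option.mem_def, Option.some.injEq] at hy
            subst hy
            have hgl : (q ++ [a]).getLast? = some a := by simp
            rw [hgl, Option.mem_def, Option.some.injEq] at hu
            subst hu
            exact hax
          have hrec := ih t ((q ++ [a]) ++ [x]) c (by simp at hn; omega) hch
          have hi : (q ++ [a]).length - 1 + 1 = ((q ++ [a]) ++ [x]).length - 1 := by simp
          have hw : (q ++ [a]) ++ x :: t = ((q ++ [a]) ++ [x]) ++ t := by simp
          rw [hi, hw, hrec]
          have hstk : (x :: t).foldl pvStep (q ++ [a]) = t.foldl pvStep ((q ++ [a]) ++ [x]) := by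
            have h2 : pvStep (q ++ [a]) x = (q ++ [a]) ++ [x] := by
              simp [pvStep, hax]
            simp [h2]
          rw [hstk]

-- the sweep from index 0 is the full stack reduction
theorem pvSweep_zero (w : List Int) :
    pvSweep w 0 false = (w.foldl pvStep [], decide (w.foldl pvStep [] ≠ w)) := by
  simpa using pvSweep_eq_stack w.length w [] false le_rfl (by simp)

-- what A's outer loop computes once the word is reduced: trim cancelling ends
def trimAll (w : List Int) : List Int :=
  if h : 2 ≤ w.length ∧ w.getD 0 0 = -(w.getD (w.length - 1) 0) then trimAll w.tail.dropLast
  else w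
termination_by w.length
decreasing_by
  simp only [List.length_dropLast, List.length_tail]
  omega

theorem slice_one_neg_one (u : List Int) :
    PySem.List.slice u (some 1) (some (-1)) = u.tail.dropLast := by
  cases u with
  | nil => rfl
  | cons x t =>
    simp [PySem.List.slice, PySem.List.clampIdx, List.dropLast_eq_take, List.tail]
    split_ifs <;> omega

theorem pyGetD_last (u : List Int) (h : u ≠ []) :
    PySem.List.pyGetD u (-1) 0 = u.getD (u.length - 1) 0 := by
  rw [PySem.List.pyGetD_neg_one u 0 h, List.getLast_eq_getElem,
    List.getD_eq_getElem?_getD, List.getElem?_eq_getElem]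
  rfl

-- A's wrap test, written with Python indexing, is trimAll's test
theorem wrap_iff (u : List Int) :
    (2 ≤ u.length ∧ PySem.List.pyGetD u 0 0 = -(PySem.List.pyGetD u (-1) 0)) ↔
      (2 ≤ u.length ∧ u.getD 0 0 = -(u.getD (u.length - 1) 0)) := by
  refine and_congr_right fun h2 => ?_
  have hne : u ≠ [] := by
    intro hu
    rw [hu] at h2
    simp at h2
  rw [PySem.List.pyGetD_zero, pyGetD_last u hne]

theorem pvReduceLoop_reduced (n : Nat) : ∀ (u : List Int), u.length ≤ n → List.IsChain NC u →
    pvReduceLoop u true = trimAll u := by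
  induction n with
  | zero =>
    intro u hu _
    have h0 : u = [] := List.eq_nil_of_length_eq_zero (by omega)
    subst h0
    rw [pvReduceLoop, trimAll]
    simp
  | succ n ih =>
    intro u hu hch
    by_cases hu0 : u = []
    · subst hu0
      rw [pvReduceLoop, trimAll]
      simp
    · rw [pvReduceLoop, if_pos ⟨rfl, hu0⟩]
      have hfix : u.foldl pvStep [] = u := by
        simpa using foldl_pvStep_fixed u [] (by simpa using hch)
      simp only [pvSweep_zero, hfix, ne_eq, not_true_eq_false, decide_false]
      by_cases hwrap : 2 ≤ u.length ∧ u.getD 0 0 = -(u.getD (u.length - 1) 0)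
      · rw [if_pos ((wrap_iff u).mpr hwrap), slice_one_neg_one]
        rw [ih u.tail.dropLast (by simp; omega) (hch.tail.dropLast)]
        conv_rhs => rw [trimAll, dif_pos hwrap]
      · rw [if_neg (fun hcon => hwrap ((wrap_iff u).mp hcon))]
        rw [pvReduceLoop, if_neg (by simp)]
        rw [trimAll, dif_neg hwrap]

theorem reduce_backtracks_eq (w : List Int) :
    reduce_backtracks w = trimAll (w.foldl pvStep []) := by
  unfold reduce_backtracks
  rw [pvReduceLoopF_eq (2 * w.length + 1) w true (by simp)]
  by_cases hw0 : w = []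
  · subst hw0
    rw [pvReduceLoop, trimAll]
    simp
  · rw [pvReduceLoop, if_pos ⟨rfl, hw0⟩]
    have hch : List.IsChain NC (w.foldl pvStep []) := foldl_pvStep_chain w [] (by simp)
    simp only [pvSweep_zero]
    set u := w.foldl pvStep [] with hu
    by_cases hwrap : 2 ≤ u.length ∧ u.getD 0 0 = -(u.getD (u.length - 1) 0)
    · rw [if_pos ((wrap_iff u).mpr hwrap), slice_one_neg_one]
      rw [pvReduceLoop_reduced u.tail.dropLast.length u.tail.dropLast le_rfl hch.tail.dropLast]
      conv_rhs => rw [trimAll, dif_pos hwrap]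
    · rw [if_neg (fun hcon => hwrap ((wrap_iff u).mp hcon))]
      by_cases hne : u = w
      · rw [hne]
        simp only [ne_eq, not_true_eq_false, decide_false]
        rw [pvReduceLoop, if_neg (by simp)]
        rw [← hne, trimAll, dif_neg hwrap]
      · have : decide (u ≠ w) = true := by simp [hne]
        rw [this, pvReduceLoop_reduced u.length u le_rfl hch]

theorem tail_take' {α : Type} (k : Nat) (m : List α) :
    (List.take k m).tail = List.take (k - 1) m.tail := by
  cases m <;> cases k <;> simp

theorem dropLast_take' {α : Type} (i : Nat) (l : List α) :
    (List.take i l).dropLast = List.take (min i l.length - 1) l := by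
  rw [List.dropLast_eq_take, List.length_take, List.take_take]
  congr 1
  omega

theorem window_getD_zero (st : List Int) (lo hi : Nat) (hhi : hi ≤ st.length)
    (h : lo < hi) : ((st.drop lo).take (hi - lo)).getD 0 0 = st.getD lo 0 := by
  simp only [List.getD_eq_getElem?_getD, List.getElem?_take, List.getElem?_drop]
  rw [if_pos (by omega)]
  norm_num

theorem window_getD_last (st : List Int) (lo hi : Nat) (hhi : hi ≤ st.length)
    (h : lo < hi) :
    ((st.drop lo).take (hi - lo)).getD (((st.drop lo).take (hi - lo)).length - 1) 0 =
      st.getD (hi - 1) 0 := by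
  have hlen : ((st.drop lo).take (hi - lo)).length = hi - lo := by
    simp only [List.length_take, List.length_drop]
    omega
  rw [hlen]
  simp only [List.getD_eq_getElem?_getD, List.getElem?_take, List.getElem?_drop]
  rw [if_pos (by omega)]
  congr 2
  omega

theorem window_length (st : List Int) (lo hi : Nat) (hhi : hi ≤ st.length) :
    ((st.drop lo).take (hi - lo)).length = hi - lo := by
  simp only [List.length_take, List.length_drop]
  omega

-- B's two-pointer trim computes trimAll of the window
theorem pvTrim_eq (st : List Int) (lo hi : Nat) : hi ≤ st.length → lo ≤ hi →
    PySem.List.slice st (some ((pvTrim st lo hi).1 : Int)) (some ((pvTrim st lo hi).2 : Int)) =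
      trimAll ((st.drop lo).take (hi - lo)) := by
  induction lo, hi using pvTrim.induct (st := st) with
  | case1 lo hi hc ih =>
    intro hhi hlo
    have hT : pvTrim st lo hi = pvTrim st (lo + 1) (hi - 1) := by
      rw [pvTrim]
      exact if_pos hc
    rw [hT, ih (by omega) (by omega)]
    have hwin : ((st.drop lo).take (hi - lo)).tail.dropLast =
        (st.drop (lo + 1)).take (hi - 1 - (lo + 1)) := by
      rw [tail_take', List.tail_drop, dropLast_take']
      congr 1
      simp only [List.length_take, List.length_drop]
      omega
    have hcond : 2 ≤ ((st.drop lo).take (hi - lo)).length ∧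
        ((st.drop lo).take (hi - lo)).getD 0 0 =
          -(((st.drop lo).take (hi - lo)).getD (((st.drop lo).take (hi - lo)).length - 1) 0) := by
      refine ⟨by rw [window_length st lo hi hhi]; omega, ?_⟩
      rw [window_getD_zero st lo hi hhi (by omega),
        window_getD_last st lo hi hhi (by omega)]
      exact hc.2
    have hstep : trimAll ((st.drop lo).take (hi - lo)) =
        trimAll (((st.drop lo).take (hi - lo)).tail.dropLast) := by
      conv_lhs => rw [trimAll]
      rw [dif_pos hcond]
    rw [hstep, hwin]
  | case2 lo hi hc =>
    intro hhi hlo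
    have hT : pvTrim st lo hi = (lo, hi) := by
      rw [pvTrim]
      exact if_neg hc
    rw [hT, PySem.List.slice_natCast]
    rw [trimAll, dif_neg ?_]
    intro ⟨ha, hb⟩
    rw [window_length st lo hi hhi] at ha
    rw [window_getD_zero st lo hi hhi (by omega),
      window_getD_last st lo hi hhi (by omega)] at hb
    exact hc ⟨by omega, hb⟩

-- both canonicalisations are the minimum over the same list of rotations
theorem canon_eq (r : List Int) (hr : r ≠ []) : cyclic_canonical r = pvCanon r := by
  simp only [cyclic_canonical, pvCanon]
  rw [if_neg hr]
  have hmap : (List.range r.length).map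
      (fun (i : Nat) => PySem.List.slice r (some (i : Int)) none ++ PySem.List.slice r none (some (i : Int))) =
      (List.range r.length).map
      (fun (i : Nat) => PySem.List.slice (r ++ r) (some (i : Int)) (some ((i : Int) + (r.length : Int)))) := by
    apply List.map_congr_left
    intro i hi
    rw [List.mem_range] at hi
    rw [PySem.List.slice_from_natCast, PySem.List.slice_to_natCast, PySem.List.slice_natCast_add]
    rw [List.drop_append_of_le_length (by omega), List.take_append,
      List.take_of_length_le (l := List.drop i r) (i := r.length)
        (by rw [List.length_drop]; omega), List.length_drop]
    congr 2
    omega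
  rw [hmap]

theorem process_eq (nw : List Int) :
    (if reduce_backtracks nw ≠ [] then cyclic_canonical (reduce_backtracks nw) else []) =
      pvProcess nw := by
  simp only [pvProcess]
  rw [pvTrimF_eq (nw.foldl pvStep []).length (nw.foldl pvStep []) 0 (nw.foldl pvStep []).length (by omega)]
  have hst := pvTrim_eq (nw.foldl pvStep []) 0 (nw.foldl pvStep []).length le_rfl (Nat.zero_le _)
  simp only [List.drop_zero, Nat.sub_zero, List.take_length] at hst
  rw [hst, reduce_backtracks_eq]
  by_cases h : trimAll (nw.foldl pvStep []) = []
  · simp [h]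
  · rw [if_pos h, if_pos h, canon_eq _ h]

theorem ports_agree (word : List Int) (e_idx : Int) (D : Int) :
    plaquette_insertions word e_idx D = plaquette_insertions_alt word e_idx D := by
  simp only [plaquette_insertions, plaquette_insertions_alt]
  congr 1
  funext acc nu_dir
  by_cases h : nu_dir = |PySem.List.pyGetD word e_idx 0|
  · simp only [if_pos h]
  · simp only [if_neg h, List.foldl_cons, List.foldl_nil]
    rw [process_eq, process_eq]
    simp

-- ===== VERDICT (by name: the statement is the Claim_ definition above) =====
theorem plaquette_insertions_spec : Claim_equal_plaquette_insertions := by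
  intro word e_idx D _ _
  unfold Spec_plaquette_insertions
  exact ports_agree word e_idx D
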